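-- pv_equiv track=rewrite | github.com/Genshii8/anki-pass-rate-bar | __init__.py | _rev_counts
-- ===== SOURCE A (Python) =====
-- from typing import Dict, Tuple, List, Optional
--
-- def _rev_counts(revs: List[Tuple[int, int]]) -> Tuple[int, int, int, int]:
--     review_correct  = 0
--     review_wrong    = 0
--     all_correct     = 0
--     all_wrong       = 0
--     for ease, type in revs:
--         if type == 1 and ease == 1:
--             review_wrong += 1
--         elif type == 1:
--             review_correct += 1
--
--         if ease == 1:
--             all_wrong += 1
--         else:
--             all_correct += 1
--
--     return (review_correct, review_wrong, all_correct, all_wrong)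
-- ===== SOURCE B (Python) =====
-- def _rev_counts(revs):
--     # one pass builds a frequency table over (type, ease) categories,
--     # then the four outputs are aggregated from the table's distinct keys
--     table = {}
--     for ease, type in revs:
--         key = (type, ease)
--         table[key] = table.get(key, 0) + 1
--     review_wrong = table.get((1, 1), 0)
--     review_correct = sum(n for (t, e), n in table.items() if t == 1 and e != 1)
--     all_wrong = sum(n for (t, e), n in table.items() if e == 1)
--     all_correct = len(revs) - all_wrong
--     return (review_correct, review_wrong, all_correct, all_wrong)
-- ===== Notes on version B (the rewrite author's own statement) =====
-- stated objective: alternative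
-- what changed: B replaces A's per-element four-way branching with a frequency table over (type, ease) categories built in one pass, computing the four outputs by aggregating over the table's distinct keys (all_correct as len(revs) minus all_wrong).
import Mathlib
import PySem

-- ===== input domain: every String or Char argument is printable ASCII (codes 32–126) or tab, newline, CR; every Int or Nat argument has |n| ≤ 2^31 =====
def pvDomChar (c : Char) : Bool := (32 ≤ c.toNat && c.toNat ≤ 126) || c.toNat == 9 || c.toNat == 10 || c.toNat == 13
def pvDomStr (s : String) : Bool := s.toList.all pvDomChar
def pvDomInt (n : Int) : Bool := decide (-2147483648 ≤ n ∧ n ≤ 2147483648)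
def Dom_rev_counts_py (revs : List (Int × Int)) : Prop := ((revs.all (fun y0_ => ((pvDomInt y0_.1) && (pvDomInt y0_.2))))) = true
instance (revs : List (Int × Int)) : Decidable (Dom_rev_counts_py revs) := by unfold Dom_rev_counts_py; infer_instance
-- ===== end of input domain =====

-- B replaces A's per-element four-way branching with a (type, ease) frequency table
-- built in one pass and aggregated over its distinct keys (objective: alternative).

-- ===== PORT A =====
def rev_counts_py (revs : List (Int × Int)) : Int × Int × Int × Int :=
  let st := revs.foldl
    (fun (st : Int × Int × Int × Int) r =>
      let rc := st.1; let rw := st.2.1; let ac := st.2.2.1; let aw := st.2.2.2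
      let p : Int × Int :=
        if r.2 = 1 ∧ r.1 = 1 then (rc, rw + 1)
        else if r.2 = 1 then (rc + 1, rw)
        else (rc, rw)
      let q : Int × Int := if r.1 = 1 then (ac, aw + 1) else (ac + 1, aw)
      (p.1, p.2, q.1, q.2))
    (0, 0, 0, 0)
  (st.1, st.2.1, st.2.2.1, st.2.2.2)

-- ===== PORT B =====
def rev_counts_py_alt (revs : List (Int × Int)) : Int × Int × Int × Int :=
  let table : PySem.Dict (Int × Int) Int :=
    revs.foldl (fun d r => d.insert (r.2, r.1) (d.getD (r.2, r.1) 0 + 1)) PySem.Dict.empty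
  let review_wrong := table.getD (1, 1) 0
  let review_correct := ((table.items.filter (fun p => p.1.1 == 1 && p.1.2 != 1)).map (·.2)).sum
  let all_wrong := ((table.items.filter (fun p => p.1.2 == 1)).map (·.2)).sum
  let all_correct := (revs.length : Int) - all_wrong
  (review_correct, review_wrong, all_correct, all_wrong)

-- ===== PRECONDITION & SPEC =====
def Spec_rev_counts_py (revs : List (Int × Int)) (out : Int × Int × Int × Int) : Prop := out = rev_counts_py_alt revs
instance (revs : List (Int × Int)) (out : Int × Int × Int × Int) : Decidable (Spec_rev_counts_py revs out) := by unfold Spec_rev_counts_py; infer_instance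

-- ===== CLAIM (what is proved, stated in full; the proofs are below) =====
def Claim_equal_rev_counts_py : Prop := ∀ (revs : List (Int × Int)), Dom_rev_counts_py revs → Spec_rev_counts_py revs (rev_counts_py revs)

-- ===== LEMMAS AND PROOFS =====

-- predicates, as Bool tests on a review (ease, type)
def pcRC (r : Int × Int) : Bool := r.2 == 1 && !(r.1 == 1)
def pcRW (r : Int × Int) : Bool := r.2 == 1 && r.1 == 1
def pcAW (r : Int × Int) : Bool := r.1 == 1

-- A's loop, with an arbitrary initial state, adds the four counts
theorem A_foldl (revs : List (Int × Int)) (rc rw ac aw : Int) :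
    revs.foldl
      (fun (st : Int × Int × Int × Int) r =>
        let rc := st.1; let rw := st.2.1; let ac := st.2.2.1; let aw := st.2.2.2
        let p : Int × Int :=
          if r.2 = 1 ∧ r.1 = 1 then (rc, rw + 1)
          else if r.2 = 1 then (rc + 1, rw)
          else (rc, rw)
        let q : Int × Int := if r.1 = 1 then (ac, aw + 1) else (ac + 1, aw)
        (p.1, p.2, q.1, q.2)) (rc, rw, ac, aw)
    = (rc + revs.countP pcRC, rw + revs.countP pcRW,
       ac + revs.countP (fun r => !pcAW r), aw + revs.countP pcAW) := by
  induction revs generalizing rc rw ac aw with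
  | nil => simp
  | cons r rest ih =>
    obtain ⟨e, t⟩ := r
    simp only [List.foldl_cons, List.countP_cons]
    by_cases h1 : t = 1 <;> by_cases h2 : e = 1 <;>
      simp [ih, pcRC, pcRW, pcAW, h1, h2, add_assoc, add_comm, add_left_comm]

-- sum of counts over the distinct keys satisfying p = countP p  (Int-valued)
theorem sum_counts_filter (ys : List (Int × Int)) (p : Int × Int → Bool) :
    ((((PySem.Set.ofList ys).filter p).map (fun k => ((ys.count k : Nat) : Int)))).sum
      = ((ys.countP p : Nat) : Int) := by
  have hperm : (PySem.Set.ofList ys : List (Int × Int)).Perm ys.dedup := by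
    rw [List.perm_ext_iff_of_nodup (PySem.Set.nodup_ofList ys) ys.nodup_dedup]
    intro a; rw [PySem.Set.mem_ofList, List.mem_dedup]
  have hck : ∀ k : Int × Int, ys.count k = @List.count _ instBEqOfDecidableEq k ys := by
    intro k; simp only [List.count_eq_countP]
    apply List.countP_congr; intro r _; simp
  have h2 : (((PySem.Set.ofList ys).filter p).map
        (fun k => @List.count _ instBEqOfDecidableEq k ys)).sum = ys.countP p :=
    (((hperm.filter p).map _).sum_eq).trans (List.sum_map_count_dedup_filter_eq_countP p ys)
  calc ((((PySem.Set.ofList ys).filter p).map (fun k => ((ys.count k : Nat) : Int)))).sum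
      = (((((PySem.Set.ofList ys).filter p).map
            (fun k => @List.count _ instBEqOfDecidableEq k ys)).map (Nat.cast : Nat → Int))).sum := by
        simp only [hck, List.map_map]; rfl
    _ = (((((PySem.Set.ofList ys).filter p).map
            (fun k => @List.count _ instBEqOfDecidableEq k ys))).sum : Nat) :=
        (Nat.cast_list_sum _).symm
    _ = ((ys.countP p : Nat) : Int) := by rw [h2]

theorem rev_counts_py_spec_aux (revs : List (Int × Int)) :
    rev_counts_py revs = rev_counts_py_alt revs := by
  -- evaluate A
  rw [rev_counts_py]
  simp only [A_foldl, zero_add]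
  -- evaluate B: the dict loop is Counter over the swapped list
  rw [rev_counts_py_alt]
  have hfold : revs.foldl
      (fun (d : PySem.Dict (Int × Int) Int) r => d.insert (r.2, r.1) (d.getD (r.2, r.1) 0 + 1))
      PySem.Dict.empty
      = PySem.Dict.counter (revs.map (fun r => (r.2, r.1))) := by
    rw [← PySem.Dict.foldl_insert_getD_add_one_eq_counter, List.foldl_map]
  simp only [hfold, PySem.Dict.items_counter, PySem.Dict.getD_counter]
  set ys := revs.map (fun r => (r.2, r.1)) with hys
  -- the items-based sums become key sums over the distinct categories
  have hsum : ∀ p : Int × Int → Bool,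
      ((((PySem.Set.ofList ys).map (fun k => (k, (ys.count k : Int)))).filter
          (fun q => p q.1)).map (·.2)).sum = ((ys.countP p : Nat) : Int) := by
    intro p
    rw [List.filter_map, List.map_map]
    have : ((fun q : (Int × Int) × Int => p q.1) ∘ fun k => (k, (ys.count k : Int)))
        = p := rfl
    rw [this]
    have : ((fun q : (Int × Int) × Int => q.2) ∘ fun k : Int × Int => (k, (ys.count k : Int)))
        = fun k => ((ys.count k : Nat) : Int) := rfl
    rw [this, sum_counts_filter]
  have h1 := hsum (fun k => k.1 == 1 && k.2 != 1)
  have h2 := hsum (fun k => k.2 == 1)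
  simp only [h1, h2]
  -- translate the four components back to countP over revs
  have hc1 : ys.countP (fun k => k.1 == 1 && k.2 != 1) = revs.countP pcRC := by
    rw [hys, List.countP_map]; apply List.countP_congr; intro r _
    simp [pcRC, Function.comp, bne]
  have hc2 : ys.count ((1 : Int), (1 : Int)) = revs.countP pcRW := by
    rw [hys]
    simp only [List.count_eq_countP, List.countP_map]
    apply List.countP_congr; intro r _
    rcases r with ⟨e, t⟩
    simp [pcRW, Prod.ext_iff, and_comm]
  have hc3 : ys.countP (fun k => k.2 == 1) = revs.countP pcAW := by
    rw [hys, List.countP_map]; rfl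
  have hlen : (revs.length : Int) - (revs.countP pcAW : Nat)
      = ((revs.countP (fun r => !pcAW r) : Nat) : Int) := by
    have := List.length_eq_countP_add_countP (p := pcAW) (l := revs)
    have h4 : revs.countP (fun r => !pcAW r) = revs.countP (fun a => decide ¬pcAW a = true) := by
      apply List.countP_congr; intro r _; simp
    omega
  simp only [hc1, hc2, hc3, hlen]

-- ===== VERDICT (by name: the statement is the Claim_ definition above) =====
theorem rev_counts_py_spec : Claim_equal_rev_counts_py := by
  intro revs _
  unfold Spec_rev_counts_py
  exact rev_counts_py_spec_aux revs
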